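-- pv_equiv track=rewrite | github.com/irinaxmoisa/TemaSI | meta-tema2/test.py | color_sequence
-- ===== SOURCE A (Python) =====
-- COLOR_SEQUENCES = [
--     (1, [1, 2, 4, 5, 6]),
--     (1, [7, 5, 4, 3, 5]),
--     (2, [1, 5, 2, 3, 6]),
--     (1, [6, 7, 3, 2, 5]),
--     (1, [1, 2, 6, 2, 4]),
-- ]
--
-- def color_sequence(nleds, seq, step):
--     sequence = COLOR_SEQUENCES[seq][1]
--     # compute the color sequence
--     colors = []
--     sidx = step // COLOR_SEQUENCES[seq][0]
--     for _ in range(nleds):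
--         colors.append(sequence[sidx % len(sequence)])
--         sidx += 1
--     return colors
-- ===== SOURCE B (Python) =====
-- COLOR_SEQUENCES = [
--     (1, [1, 2, 4, 5, 6]),
--     (1, [7, 5, 4, 3, 5]),
--     (2, [1, 5, 2, 3, 6]),
--     (1, [6, 7, 3, 2, 5]),
--     (1, [1, 2, 6, 2, 4]),
-- ]
--
-- def color_sequence(nleds, seq, step):
--     div, sequence = COLOR_SEQUENCES[seq]
--     n = len(sequence)
--     o = (step // div) % n
--     rot = sequence[o:] + sequence[:o]
--     return (rot * (nleds // n + 1))[:nleds]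
-- ===== Notes on version B (the rewrite author's own statement) =====
-- stated objective: idiomatic
-- what changed: Replaces A's per-LED modular-index append loop with one rotation of the colour sequence, list multiplication (tiling) and a slice.
import Mathlib
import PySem

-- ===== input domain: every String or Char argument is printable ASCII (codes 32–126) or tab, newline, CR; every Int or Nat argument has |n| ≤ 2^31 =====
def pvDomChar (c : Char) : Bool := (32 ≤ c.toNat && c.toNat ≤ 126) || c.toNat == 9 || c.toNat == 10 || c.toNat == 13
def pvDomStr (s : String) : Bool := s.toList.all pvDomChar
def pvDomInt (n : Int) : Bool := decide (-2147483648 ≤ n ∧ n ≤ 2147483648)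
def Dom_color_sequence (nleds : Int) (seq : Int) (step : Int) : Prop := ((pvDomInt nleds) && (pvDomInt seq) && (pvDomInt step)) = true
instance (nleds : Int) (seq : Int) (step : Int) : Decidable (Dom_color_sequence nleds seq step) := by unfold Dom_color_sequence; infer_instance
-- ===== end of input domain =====

-- B builds the list by one rotation of the sequence plus tiling and a slice instead of A's
-- per-LED modular-index append loop (objective: idiomatic; return value only, no mutation).

-- ===== PORT A =====
def pvCOLOR_SEQUENCES : List (Int × List Int) :=
  [(1, [1, 2, 4, 5, 6]), (1, [7, 5, 4, 3, 5]), (2, [1, 5, 2, 3, 6]),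
   (1, [6, 7, 3, 2, 5]), (1, [1, 2, 6, 2, 4])]

-- body of A once COLOR_SEQUENCES[seq] has been looked up (div = entry[0], sequence = entry[1])
def pvA_body (divi : Int) (sequence : List Int) (nleds : Int) (step : Int) : List Int :=
  -- sidx = step // div; for _ in range(nleds): colors.append(sequence[sidx % len(sequence)]); sidx += 1
  -- sequence[sidx % len(sequence)]: the index is always in range (len = 5 > 0), so pyGetD is exact here
  (((PySem.List.pyRange 0 nleds 1).foldl
      (fun (s : List Int × Int) _ =>
        (s.1 ++ [PySem.List.pyGetD sequence (PySem.Int.mod s.2 (sequence.length : Int)) 0], s.2 + 1))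
      ([], PySem.Int.floordiv step divi))).1

def color_sequence (nleds : Int) (seq : Int) (step : Int) : List Int :=
  match PySem.List.pyGet? pvCOLOR_SEQUENCES seq with
  | none => []  -- IndexError in Python: excluded by Pre_color_sequence
  | some entry => pvA_body entry.1 entry.2 nleds step

-- ===== PORT B =====
-- body of B once COLOR_SEQUENCES[seq] has been unpacked
def pvB_body (divi : Int) (sequence : List Int) (nleds : Int) (step : Int) : List Int :=
  let n : Int := (sequence.length : Int)
  let o := PySem.Int.mod (PySem.Int.floordiv step divi) n
  let rot := PySem.List.slice sequence (some o) none ++ PySem.List.slice sequence none (some o)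
  -- rot * (nleds // n + 1): Python list multiplication (empty for a non-positive count)
  let full := List.flatten (List.replicate (PySem.Int.floordiv nleds n + 1).toNat rot)
  PySem.List.slice full none (some nleds)

def color_sequence_alt (nleds : Int) (seq : Int) (step : Int) : List Int :=
  match PySem.List.pyGet? pvCOLOR_SEQUENCES seq with
  | none => []  -- IndexError in Python: excluded by Pre_color_sequence
  | some entry => pvB_body entry.1 entry.2 nleds step

-- ===== PRECONDITION & SPEC =====
-- Pre_ excludes exactly the seq values on which COLOR_SEQUENCES[seq] raises IndexError in Python
-- (Python indexing accepts -5 ≤ seq ≤ 4, negative values wrapping around).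
def Pre_color_sequence (nleds : Int) (seq : Int) (step : Int) : Prop :=
  -5 ≤ seq ∧ seq < 5
instance (nleds : Int) (seq : Int) (step : Int) : Decidable (Pre_color_sequence nleds seq step) := by
  unfold Pre_color_sequence; infer_instance
def pvWitness_color_sequence : Int × Int × Int := (7, 2, 3)

def Spec_color_sequence (nleds : Int) (seq : Int) (step : Int) (out : List Int) : Prop := out = color_sequence_alt nleds seq step
instance (nleds : Int) (seq : Int) (step : Int) (out : List Int) : Decidable (Spec_color_sequence nleds seq step out) := by unfold Spec_color_sequence; infer_instance

-- ===== CLAIM (what is proved, stated in full; the proofs are below) =====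
def Claim_equal_color_sequence : Prop := ∀ (nleds : Int) (seq : Int) (step : Int), Dom_color_sequence nleds seq step → Pre_color_sequence nleds seq step → Spec_color_sequence nleds seq step (color_sequence nleds seq step)

-- ===== LEMMAS AND PROOFS =====

-- the common closed form: element i is sequence[(s0 + i) mod 5]
def pvElem (sequence : List Int) (s0 : Int) (i : Nat) : Int :=
  PySem.List.pyGetD sequence (PySem.Int.mod (s0 + (i : Int)) (sequence.length : Int)) 0

-- A's loop, from any accumulator and start index, appends the closed-form elements
lemma pvA_loop (sequence : List Int) (l : List Int) :
    ∀ (acc : List Int) (sidx : Int),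
      ((l.foldl
        (fun (s : List Int × Int) _ =>
          (s.1 ++ [PySem.List.pyGetD sequence (PySem.Int.mod s.2 (sequence.length : Int)) 0], s.2 + 1))
        (acc, sidx))).1
      = acc ++ (List.range l.length).map (fun i => pvElem sequence sidx i) := by
  induction l with
  | nil => simp
  | cons x t ih =>
    intro acc sidx
    simp only [List.foldl_cons, List.length_cons, List.range_succ_eq_map, List.map_cons,
      List.map_map]
    rw [ih]
    simp [pvElem, List.append_assoc, Function.comp]
    intro a _
    congr 2
    ring

lemma pvA_closed (divi : Int) (sequence : List Int) (nleds : Int) (step : Int) :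
    pvA_body divi sequence nleds step
      = (List.range nleds.toNat).map (fun i => pvElem sequence (PySem.Int.floordiv step divi) i) := by
  unfold pvA_body
  rw [pvA_loop]
  simp [PySem.List.length_pyRange_one]

-- tiling a period-m block of a function is the prefix map of that function
lemma pvTile {α : Type} (f : Nat → α) (m : Nat) (hper : ∀ i, f (i + m) = f i) :
    ∀ k : Nat, List.flatten (List.replicate k ((List.range m).map f))
      = (List.range (m * k)).map f := by
  intro k
  induction k with
  | zero => simp
  | succ k ih =>
    have hm : m * (k + 1) = m + m * k := by ring
    rw [List.replicate_succ, List.flatten_cons, ih, hm, List.range_add, List.map_append,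
      List.map_map]
    congr 1
    apply List.map_congr_left
    intro i _
    simp only [Function.comp]
    rw [Nat.add_comm m i, hper]

-- the rotated list is the first period of the closed form
lemma pvRot (sequence : List Int) (h5 : sequence.length = 5) (s0 : Int) :
    PySem.List.slice sequence (some (PySem.Int.mod s0 5)) none
      ++ PySem.List.slice sequence none (some (PySem.Int.mod s0 5))
    = (List.range 5).map (fun i => pvElem sequence s0 i) := by
  set o := PySem.Int.mod s0 5 with ho
  have h0 : 0 ≤ o := PySem.Int.mod_nonneg s0 (by norm_num)
  have hlt : o < 5 := PySem.Int.mod_lt s0 (by norm_num)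
  rw [PySem.List.slice_from _ h0, PySem.List.slice_to _ h0]
  have hoemod : o = s0 % 5 := by
    rw [ho, PySem.Int.mod_eq_emod_of_pos (by norm_num)]
  have hon : o.toNat ≤ 5 := by omega
  apply List.ext_getElem
  · simp [h5]; omega
  · intro i hi _
    have hi5 : i < 5 := by simp [h5] at hi; omega
    have hgd : ∀ j : Nat, j < 5 →
        pvElem sequence s0 j = sequence.getD ((s0 + (j : Int)) % 5).toNat 0 := by
      intro j hj
      unfold pvElem
      rw [h5, PySem.Int.mod_eq_emod_of_pos (by norm_num),
        PySem.List.pyGetD_eq_getElem _ 0 (by omega) (by rw [h5]; push_cast; omega)]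
      have hj2 : ((s0 + (j : Int)) % 5).toNat < sequence.length := by rw [h5]; omega
      rw [List.getD_eq_getElem _ _ hj2]
      norm_num
    simp only [List.getElem_map, List.getElem_range]
    rw [hgd i hi5]
    by_cases hc : i < sequence.length - o.toNat
    · rw [List.getElem_append_left (by simpa using hc), List.getElem_drop]
      have hlt2 : ((s0 + (i : Int)) % 5).toNat < sequence.length := by rw [h5]; omega
      rw [List.getD_eq_getElem _ _ hlt2]
      congr 1
      omega
    · rw [List.getElem_append_right (by simpa using hc)]
      rw [List.getElem_take]
      have hlt2 : ((s0 + (i : Int)) % 5).toNat < sequence.length := by rw [h5]; omega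
      rw [List.getD_eq_getElem _ _ hlt2]
      congr 1
      simp only [List.length_drop]
      omega

lemma pvB_closed (divi : Int) (sequence : List Int) (h5 : sequence.length = 5)
    (nleds : Int) (step : Int) :
    pvB_body divi sequence nleds step
      = (List.range nleds.toNat).map (fun i => pvElem sequence (PySem.Int.floordiv step divi) i) := by
  unfold pvB_body
  set s0 := PySem.Int.floordiv step divi with hs0
  simp only [h5, Nat.cast_ofNat]
  rw [pvRot sequence h5 s0]
  have hper : ∀ i, pvElem sequence s0 (i + 5) = pvElem sequence s0 i := by
    intro i
    unfold pvElem
    rw [h5]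
    congr 1
    rw [PySem.Int.mod_eq_emod_of_pos (by norm_num),
        PySem.Int.mod_eq_emod_of_pos (by norm_num)]
    push_cast
    omega
  rw [pvTile _ 5 hper]
  have hdv : PySem.Int.floordiv nleds 5 = nleds / 5 :=
    PySem.Int.floordiv_eq_ediv_of_pos (by norm_num)
  rcases lt_trichotomy nleds 0 with hn | hn | hn
  · have hk : (PySem.Int.floordiv nleds 5 + 1).toNat = 0 := by rw [hdv]; omega
    have hn0 : nleds.toNat = 0 := by omega
    rw [hk, hn0]
    simp [PySem.List.slice]
  · rw [hn, PySem.List.slice_to _ (by norm_num)]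
    simp
  · rw [PySem.List.slice_to _ (by omega)]
    rw [← List.map_take, List.take_range]
    congr 1
    rw [hdv]
    congr 1
    omega

-- every entry of COLOR_SEQUENCES carries a sequence of length 5
lemma pvEntry_len (e : Int × List Int) (he : e ∈ pvCOLOR_SEQUENCES) : e.2.length = 5 := by
  fin_cases he <;> rfl

-- ===== VERDICT (by name: the statement is the Claim_ definition above) =====
theorem color_sequence_spec : Claim_equal_color_sequence := by
  intro nleds seq step _ hpre
  obtain ⟨hlo, hhi⟩ := hpre
  unfold Spec_color_sequence color_sequence color_sequence_alt
  cases h : PySem.List.pyGet? pvCOLOR_SEQUENCES seq with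
  | none =>
    -- impossible under Pre_: COLOR_SEQUENCES[seq] is defined for -5 ≤ seq < 5
    exfalso
    interval_cases seq <;> exact absurd h (by decide)
  | some entry =>
    have h5 : entry.2.length = 5 :=
      pvEntry_len entry (PySem.List.mem_of_pyGet?_eq_some pvCOLOR_SEQUENCES h)
    show pvA_body entry.1 entry.2 nleds step = pvB_body entry.1 entry.2 nleds step
    rw [pvA_closed, pvB_closed _ _ h5]
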